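-- pv_equiv track=rewrite | github.com/Enjef/Algo | 2200 - 2299/2295 - Replace Elements in an Array/2295 - Replace Elements in an Array.py | arrayChange_best_speed
-- ===== SOURCE A (Python) =====
-- from typing import List
--
-- def arrayChange_best_speed(nums: List[int], operations: List[List[int]]) -> List[int]:
--     dic = {num: i for i, num in enumerate(nums)}
--     for s, e in operations:
--         i = dic[s]
--         nums[i] = e
--         dic[e] = i
--         del dic[s]
--     return nums
-- ===== SOURCE B (Python) =====
-- def arrayChange_best_speed(nums, operations):
--     # Collapse replacement chains: scan operations in REVERSE, recording for each
--     # source s its ultimate value final.get(e, e); then one pass rewrites nums in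
--     # place through the collapsed map.  No value->index bookkeeping at all.
--     final = {}
--     for s, e in reversed(operations):
--         final[s] = final.get(e, e)
--     nums[:] = [final.get(v, v) for v in nums]
--     return nums
-- ===== Notes on version B (the rewrite author's own statement) =====
-- stated objective: alternative
-- what changed: Replaces A's value->index dict that is rewritten per operation with a reverse scan over operations building a value->final-value map (final[s] = final.get(e, e)), then a single pass rewrites nums in place through that collapsed map; no indices are tracked.
-- outside the precondition, e.g. on arrayChange_best_speed([1, 1], [[1, 2]]): A returns [1, 2], B returns [2, 2]; on arrayChange_best_speed([2, 1], [[1, 2], [2, 3]]): A returns [2, 3], B returns [3, 3]; on arrayChange_best_speed([1], [[1, 1]]): A returns [1], B returns [1]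
import Mathlib
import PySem

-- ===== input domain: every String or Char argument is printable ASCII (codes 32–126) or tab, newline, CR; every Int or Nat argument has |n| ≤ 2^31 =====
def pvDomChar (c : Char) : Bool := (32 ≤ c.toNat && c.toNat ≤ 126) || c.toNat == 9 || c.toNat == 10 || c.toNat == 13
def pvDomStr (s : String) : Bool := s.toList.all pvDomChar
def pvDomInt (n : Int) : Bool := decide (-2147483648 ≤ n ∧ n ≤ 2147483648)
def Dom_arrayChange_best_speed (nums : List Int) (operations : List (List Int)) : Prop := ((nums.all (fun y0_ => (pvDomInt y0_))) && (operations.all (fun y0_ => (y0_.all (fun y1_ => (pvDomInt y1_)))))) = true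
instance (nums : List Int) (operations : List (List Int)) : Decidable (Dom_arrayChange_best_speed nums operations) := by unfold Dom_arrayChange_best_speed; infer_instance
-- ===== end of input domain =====

-- B replaces A's value->index dict with a reverse scan over operations building a
-- value->final-value map, then one in-place pass over nums; both Pythons mutate
-- `nums` in place, and the theorem is about the returned value (the mutated list in both).


-- ===== PORT A =====
-- dic = {num: i for i, num in enumerate(nums)}
def aBuild (nums : List Int) : PySem.Dict Int Int :=
  (PySem.List.enumerate nums).foldl (fun d p => d.insert p.2 p.1) PySem.Dict.empty

-- one iteration of A's loop: unpack op as [s, e] (else ValueError → none),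
-- i = dic[s] (KeyError → none), nums[i] = e, dic[e] = i, del dic[s]
def aStep (st : Option (List Int × PySem.Dict Int Int)) (op : List Int) :
    Option (List Int × PySem.Dict Int Int) :=
  match st, op with
  | some (xs, d), [s, e] =>
    match d.get? s with
    | some i => some (PySem.List.pySetD xs i e, (d.insert e i).erase s)
    | none => none
  | _, _ => none

def arrayChange_best_speed (nums : List Int) (operations : List (List Int)) : List Int :=
  match operations.foldl aStep (some (nums, aBuild nums)) with
  | some (xs, _) => xs
  | none => nums   -- unreachable under Pre_ (Python raised)

-- ===== PORT B =====
-- for s, e in reversed(operations): final[s] = final.get(e, e)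
-- (unpacking a non-pair op raises ValueError → none)
def bBuild (operations : List (List Int)) : Option (PySem.Dict Int Int) :=
  operations.reverse.foldl
    (fun od op =>
      match od, op with
      | some d, [s, e] => some (d.insert s (d.getD e e))
      | _, _ => none)
    (some PySem.Dict.empty)

-- nums[:] = [final.get(v, v) for v in nums]; return nums
def arrayChange_best_speed_alt (nums : List Int) (operations : List (List Int)) : List Int :=
  match bBuild operations with
  | some final => nums.map (fun v => final.getD v v)
  | none => nums   -- unreachable under Pre_ (Python raised)

-- ===== PRECONDITION & SPEC =====
def subst (s e v : Int) : Int := if v = s then e else v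

-- the LeetCode-2295 guarantees, relaxed op by op: each operation is a pair [s, e] whose source
-- value s occurs exactly once in the current list and differs from its target e (this also
-- covers exactly where A's "s, e = op" / "dic[s]" cannot raise ValueError/KeyError)
def validOps : List Int → List (List Int) → Bool
  | _, [] => true
  | xs, op :: rest =>
    match op with
    | [s, e] => decide (xs.count s = 1) && decide (e ≠ s) && validOps (xs.map (subst s e)) rest
    | _ => false

-- Pre_ = the problem's guarantees (relaxed).  It excludes (a) inputs where A raises (KeyError
-- on a missing source value, ValueError on a non-pair op) and (b) operations whose source
-- value is duplicated in the current list or equals its target, where WHICH occurrence gets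
-- replaced (resp. whether the value survives in A's dict) is an artefact of A's value->index
-- bookkeeping (both behaviours defensible; see claim cites).
def Pre_arrayChange_best_speed (nums : List Int) (operations : List (List Int)) : Prop :=
  validOps nums operations = true
instance (nums : List Int) (operations : List (List Int)) : Decidable (Pre_arrayChange_best_speed nums operations) := by unfold Pre_arrayChange_best_speed; infer_instance

def pvWitness_arrayChange_best_speed : List Int × List (List Int) :=
  ([1, 2, 4, 6], [[1, 3], [4, 7], [6, 1]])

def Spec_arrayChange_best_speed (nums : List Int) (operations : List (List Int)) (out : List Int) : Prop := out = arrayChange_best_speed_alt nums operations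
instance (nums : List Int) (operations : List (List Int)) (out : List Int) : Decidable (Spec_arrayChange_best_speed nums operations out) := by unfold Spec_arrayChange_best_speed; infer_instance

-- ===== CLAIM (what is proved, stated in full; the proofs are below) =====
def Claim_equal_arrayChange_best_speed : Prop := ∀ (nums : List Int) (operations : List (List Int)), Dom_arrayChange_best_speed nums operations → Pre_arrayChange_best_speed nums operations → Spec_arrayChange_best_speed nums operations (arrayChange_best_speed nums operations)

-- ===== LEMMAS AND PROOFS =====

-- the abstract meaning of one operation: replace the (unique) occurrence of s by e
def stepN (xs : List Int) (op : List Int) : List Int :=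
  match op with
  | [s, e] => xs.map (subst s e)
  | _ => xs

theorem subst_self (s e : Int) : subst s e s = e := if_pos rfl

theorem subst_of_ne (s e v : Int) (h : v ≠ s) : subst s e v = v := if_neg h

-- d.get? after d.erase (PySem ships no get?/erase lemma)
theorem dict_get?_erase (d : PySem.Dict Int Int) (k k' : Int) :
    (d.erase k).get? k' = if k' = k then none else d.get? k' := by
  rcases d with ⟨l⟩
  simp only [PySem.Dict.erase, PySem.Dict.get?]
  by_cases hkk : k' = k
  · subst hkk
    rw [if_pos rfl]
    have hnone : (List.filter (fun p => !p.1 == k') l).find? (fun p => p.1 == k') = none := by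
      rw [List.find?_eq_none]
      intro x hx
      have h2 := List.of_mem_filter hx
      simp only [Bool.not_eq_eq_eq_not, Bool.not_true, beq_eq_false_iff_ne] at h2
      simp [h2]
    rw [hnone]
    rfl
  · rw [if_neg hkk]
    induction l with
    | nil => rfl
    | cons p t ih =>
      rw [List.filter_cons]
      by_cases h1 : p.1 = k
      · rw [if_neg (by simp [h1]), ih,
            List.find?_cons_of_neg (by simp only [beq_iff_eq]; exact fun h => hkk (h ▸ h1))]
      · rw [if_pos (by simp [h1])]
        by_cases h2 : p.1 = k'
        · rw [List.find?_cons_of_pos (by simp [h2]), List.find?_cons_of_pos (by simp [h2])]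
        · rw [List.find?_cons_of_neg (by simp [h2]), List.find?_cons_of_neg (by simp [h2]), ih]

-- ---------- A-side: the dict maps each uniquely-occurring value to its index ----------

def DictRep (d : PySem.Dict Int Int) (xs : List Int) : Prop :=
  ∀ v : Int, xs.count v = 1 → d.get? v = (PySem.List.index? xs v).map (fun n => (n : Int))

theorem build_get_notmem (xs : List Int) :
    ∀ (s : Int) (d : PySem.Dict Int Int) (v : Int), v ∉ xs →
      ((PySem.List.enumerate xs s).foldl (fun d p => d.insert p.2 p.1) d).get? v = d.get? v := by
  induction xs with
  | nil => intro s d v _; simp [PySem.List.enumerate]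
  | cons x t ih =>
    intro s d v hv
    rw [PySem.List.enumerate_cons, List.foldl_cons,
        ih (s + 1) (d.insert x s) v (fun h => hv (List.mem_cons_of_mem x h)),
        PySem.Dict.get?_insert_of_ne d s (fun h => hv (by rw [h]; exact List.mem_cons_self ..))]

theorem build_get_unique (xs : List Int) :
    ∀ (s : Int) (d : PySem.Dict Int Int) (v : Int), xs.count v = 1 →
      ∃ k : Nat, PySem.List.index? xs v = some k ∧
        ((PySem.List.enumerate xs s).foldl (fun d p => d.insert p.2 p.1) d).get? v
          = some (s + (k : Int)) := by
  induction xs with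
  | nil => intro s d v hc; simp at hc
  | cons x t ih =>
    intro s d v hc
    rw [PySem.List.enumerate_cons, List.foldl_cons]
    by_cases hx : x = v
    · subst hx
      have hxt : x ∉ t := by
        rw [List.count_cons_self] at hc
        exact List.count_eq_zero.mp (by omega)
      refine ⟨0, PySem.List.index?_cons_self x t, ?_⟩
      rw [build_get_notmem t (s + 1) (d.insert x s) x hxt, PySem.Dict.get?_insert_self]
      norm_num
    · have hc' : t.count v = 1 := by
        rwa [List.count_cons_of_ne hx] at hc
      obtain ⟨k, hk, hg⟩ := ih (s + 1) (d.insert x s) v hc'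
      refine ⟨k + 1, ?_, ?_⟩
      · rw [PySem.List.index?_cons_of_ne t hx, hk]; rfl
      · rw [hg]; congr 1; push_cast; ring

theorem rep_build (xs : List Int) : DictRep (aBuild xs) xs := by
  intro v hc
  obtain ⟨k, hk, hg⟩ := build_get_unique xs 0 PySem.Dict.empty v hc
  rw [aBuild, hg, hk]
  show some ((0 : Int) + (k : Int)) = some ((k : Nat) : Int)
  rw [zero_add]

-- setting the position of a uniquely-occurring s is mapping subst over the whole list
theorem set_eq_map_subst (xs : List Int) (s e : Int) :
    ∀ k : Nat, xs.count s = 1 → PySem.List.index? xs s = some k →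
      xs.set k e = xs.map (subst s e) := by
  induction xs with
  | nil => intro k _ h; simp [PySem.List.index?] at h
  | cons x t ih =>
    intro k hc h
    by_cases hx : x = s
    · subst hx
      rw [PySem.List.index?_cons_self] at h
      injection h with h0
      subst h0
      have hxt : x ∉ t := by
        rw [List.count_cons_self] at hc
        exact List.count_eq_zero.mp (by omega)
      have hmap : t.map (subst x e) = t := by
        have hpt : ∀ v ∈ t, subst x e v = id v :=
          fun v hv => subst_of_ne _ _ _ (fun hh => hxt (hh ▸ hv))
        rw [List.map_congr_left hpt, List.map_id]
      simp only [List.set_cons_zero, List.map_cons, subst_self, hmap]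
    · have hc' : t.count s = 1 := by
        rwa [List.count_cons_of_ne hx] at hc
      rw [PySem.List.index?_cons_of_ne t hx] at h
      cases hk : PySem.List.index? t s with
      | none => rw [hk] at h; simp at h
      | some n =>
        rw [hk] at h
        simp only [Option.map_some] at h
        injection h with h1
        subst h1
        simp only [List.set_cons_succ, List.map_cons, subst_of_ne _ _ _ hx]
        rw [ih n hc' hk]

theorem not_mem_map_subst (xs : List Int) (s e : Int) (hse : e ≠ s) :
    s ∉ xs.map (subst s e) := by
  intro hmem
  obtain ⟨v, hv, heq⟩ := List.mem_map.mp hmem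
  by_cases hvs : v = s
  · rw [hvs, subst_self] at heq
    exact hse heq
  · rw [subst_of_ne _ _ _ hvs] at heq
    exact hvs heq

theorem index?_map_subst_self (xs : List Int) (s e : Int) (he : e ∉ xs) :
    PySem.List.index? (xs.map (subst s e)) e = PySem.List.index? xs s := by
  induction xs with
  | nil => rfl
  | cons x t ih =>
    have he' : e ∉ t := fun h => he (List.mem_cons_of_mem x h)
    rw [List.map_cons]
    by_cases hx : x = s
    · subst hx
      rw [subst_self, PySem.List.index?_cons_self, PySem.List.index?_cons_self]
    · have hxe : x ≠ e := by rintro rfl; simp at he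
      rw [subst_of_ne _ _ _ hx, PySem.List.index?_cons_of_ne _ hxe,
          PySem.List.index?_cons_of_ne _ hx, ih he']

theorem index?_map_subst_other (xs : List Int) (s e v : Int) (hvs : v ≠ s) (hve : v ≠ e) :
    PySem.List.index? (xs.map (subst s e)) v = PySem.List.index? xs v := by
  induction xs with
  | nil => rfl
  | cons x t ih =>
    rw [List.map_cons]
    by_cases hx : x = v
    · subst hx
      rw [subst_of_ne _ _ _ hvs, PySem.List.index?_cons_self, PySem.List.index?_cons_self]
    · have hx' : subst s e x ≠ v := by
        by_cases hxs : x = s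
        · rw [hxs, subst_self]
          exact fun h => hve h.symm
        · rwa [subst_of_ne _ _ _ hxs]
      rw [PySem.List.index?_cons_of_ne _ hx', PySem.List.index?_cons_of_ne _ hx, ih]

theorem count_map_subst_other (xs : List Int) (s e v : Int) (hvs : v ≠ s) (hve : v ≠ e) :
    (xs.map (subst s e)).count v = xs.count v := by
  induction xs with
  | nil => rfl
  | cons x t ih =>
    simp only [List.map_cons, List.count_cons, ih]
    congr 1
    by_cases hxs : x = s
    · subst hxs
      rw [subst_self]
      simp [Ne.symm hve, Ne.symm hvs]
    · rw [subst_of_ne _ _ _ hxs]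

theorem count_map_subst_self (xs : List Int) (s e : Int) (hes : e ≠ s) :
    (xs.map (subst s e)).count e = xs.count e + xs.count s := by
  induction xs with
  | nil => rfl
  | cons x t ih =>
    simp only [List.map_cons, List.count_cons, ih]
    by_cases hxs : x = s
    · subst hxs
      rw [subst_self]
      simp [Ne.symm hes]
      omega
    · rw [subst_of_ne _ _ _ hxs]
      simp [hxs]
      omega

theorem rep_step (d : PySem.Dict Int Int) (xs : List Int) (s e : Int) (k : Nat)
    (hrep : DictRep d xs) (hcs : xs.count s = 1) (hes : e ≠ s)
    (hk : PySem.List.index? xs s = some k) :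
    DictRep ((d.insert e (k : Int)).erase s) (xs.map (subst s e)) := by
  intro v hcv
  rw [dict_get?_erase]
  by_cases hv : v = s
  · exfalso
    subst hv
    rw [List.count_eq_zero.mpr (not_mem_map_subst xs v e hes)] at hcv
    omega
  · rw [if_neg hv]
    by_cases hvE : v = e
    · have he : e ∉ xs := by
        have hadd := count_map_subst_self xs s e hes
        rw [hvE] at hcv
        exact List.count_eq_zero.mp (by omega)
      rw [hvE, PySem.Dict.get?_insert_self, index?_map_subst_self xs s e he, hk]
      rfl
    · rw [PySem.Dict.get?_insert_of_ne d (k : Int) hvE,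
          index?_map_subst_other xs s e v hv hvE,
          hrep v (by rw [← count_map_subst_other xs s e v hv hvE]; exact hcv)]

-- the main invariant induction over the operations, A side
theorem a_fold (ops : List (List Int)) :
    ∀ (xs : List Int) (d : PySem.Dict Int Int), DictRep d xs →
      validOps xs ops = true →
      ∃ d', ops.foldl aStep (some (xs, d)) = some (ops.foldl stepN xs, d') := by
  induction ops with
  | nil => intro xs d _ _; exact ⟨d, rfl⟩
  | cons op rest ih =>
    intro xs d hrep hval
    rcases op with _ | ⟨s, _ | ⟨e, _ | ⟨x, t⟩⟩⟩ <;> simp [validOps] at hval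
    obtain ⟨⟨hcs, hes⟩, hval'⟩ := hval
    have hs : s ∈ xs := List.count_pos_iff.mp (by omega)
    obtain ⟨k, hk⟩ := Option.isSome_iff_exists.mp ((PySem.List.index?_isSome_iff xs s).mpr hs)
    have hget : d.get? s = some (k : Int) := by rw [hrep s hcs, hk]; rfl
    have hset : PySem.List.pySetD xs (k : Int) e = xs.map (subst s e) := by
      rw [PySem.List.pySetD_natCast]
      exact set_eq_map_subst xs s e k hcs hk
    have hstep : aStep (some (xs, d)) [s, e]
        = some (xs.map (subst s e), (d.insert e (k : Int)).erase s) := by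
      simp [aStep, hget, hset]
    rw [List.foldl_cons, List.foldl_cons, hstep]
    have hsn : stepN xs [s, e] = xs.map (subst s e) := rfl
    rw [hsn]
    exact ih (xs.map (subst s e)) _ (rep_step d xs s e k hrep hcs hes hk) hval'

-- ---------- B-side: the reverse-built map is exactly the composition of the substs ----------

-- validOps only uses the shape of the ops once we quantify over xs; extract it
def allPairs : List (List Int) → Bool
  | [] => true
  | op :: rest =>
    match op with
    | [_, _] => allPairs rest
    | _ => false

theorem validOps_allPairs (ops : List (List Int)) :
    ∀ xs : List Int, validOps xs ops = true → allPairs ops = true := by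
  induction ops with
  | nil => intro xs _; rfl
  | cons op rest ih =>
    intro xs hval
    rcases op with _ | ⟨s, _ | ⟨e, _ | ⟨x, t⟩⟩⟩ <;> simp [validOps] at hval
    obtain ⟨_, hval'⟩ := hval
    exact ih (xs.map (subst s e)) hval'

-- bBuild peels the FIRST operation off via foldl over the reversed list
theorem bBuild_cons (rest : List (List Int)) (s e : Int) (d : PySem.Dict Int Int)
    (hd : bBuild rest = some d) :
    bBuild ([s, e] :: rest) = some (d.insert s (d.getD e e)) := by
  unfold bBuild
  rw [List.reverse_cons, List.foldl_append]
  have h : List.foldl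
      (fun od op =>
        match od, op with
        | some d, [s, e] => some (d.insert s (d.getD e e))
        | _, _ => none)
      (some PySem.Dict.empty) rest.reverse = some d := hd
  rw [h]; rfl

-- the collapsed map agrees pointwise with the left-to-right composition of the substs
theorem b_fold (ops : List (List Int)) (hp : allPairs ops = true) :
    ∃ d : PySem.Dict Int Int, bBuild ops = some d ∧
      ∀ xs : List Int, ops.foldl stepN xs = xs.map (fun v => d.getD v v) := by
  induction ops with
  | nil =>
    exact ⟨PySem.Dict.empty, rfl, fun xs => by
      simp [List.foldl_nil, PySem.Dict.getD_empty]⟩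
  | cons op rest ih =>
    rcases op with _ | ⟨s, _ | ⟨e, _ | ⟨x, t⟩⟩⟩ <;> simp [allPairs] at hp
    obtain ⟨d, hd, hmap⟩ := ih hp
    refine ⟨d.insert s (d.getD e e), ?_, ?_⟩
    · exact bBuild_cons rest s e d hd
    · intro xs
      rw [List.foldl_cons]
      have hsn : stepN xs [s, e] = xs.map (subst s e) := rfl
      rw [hsn, hmap (xs.map (subst s e)), List.map_map]
      refine List.map_congr_left (fun v _ => ?_)
      show d.getD (subst s e v) (subst s e v) = (d.insert s (d.getD e e)).getD v v
      by_cases hv : v = s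
      · subst hv
        rw [subst_self, PySem.Dict.getD_insert_self]
      · rw [subst_of_ne _ _ _ hv, PySem.Dict.getD_insert]
        simp [hv]

-- ===== VERDICT (by name: the statement is the Claim_ definition above) =====
theorem arrayChange_best_speed_spec : Claim_equal_arrayChange_best_speed := by
  intro nums operations _ hpre
  obtain ⟨d', hfoldA⟩ := a_fold operations nums (aBuild nums) (rep_build nums) hpre
  obtain ⟨d, hd, hmap⟩ := b_fold operations (validOps_allPairs operations nums hpre)
  unfold Spec_arrayChange_best_speed arrayChange_best_speed arrayChange_best_speed_alt
  rw [hfoldA, hd, hmap nums]
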